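-- pv_equiv track=rewrite | github.com/Skypromd/SelfMonitor | services/ipo-readiness/app/main.py | _generate_remediation_plan
-- ===== SOURCE A (Python) =====
-- from typing import Annotated, Any, Dict, List, Optional, Literal
--
-- def _generate_remediation_plan(gaps: List[str]) -> List[str]:  # type: ignore
--     """Generate remediation plan for compliance gaps"""
--     if not gaps:
--         return []
--
--     remediation_actions: List[str] = []  # type: ignore
--     for gap in gaps:
--         if "financial_reporting" in gap:
--             remediation_actions.append("Implement additional financial controls and review processes")  # type: ignore
--         elif "data_protection" in gap:
--             remediation_actions.append("Enhance data protection policies and staff training")  # type: ignore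
--         elif "disclosure" in gap:
--             remediation_actions.append("Review and update disclosure procedures")  # type: ignore
--         else:
--             remediation_actions.append(f"Address compliance gap: {gap}")  # type: ignore
--
--     return remediation_actions  # type: ignore
-- ===== SOURCE B (Python) =====
-- _TABLE = [
--     ("financial_reporting", "Implement additional financial controls and review processes"),
--     ("data_protection", "Enhance data protection policies and staff training"),
--     ("disclosure", "Review and update disclosure procedures"),
-- ]
--
-- def _generate_remediation_plan(gaps):
--     # Staged passes: start with the fallback for every gap, then sweep the
--     # keywords in reverse priority order, overwriting matching slots; the
--     # highest-priority keyword sweeps last, so it wins on multi-keyword gaps.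
--     plan = [f"Address compliance gap: {gap}" for gap in gaps]
--     for key, action in reversed(_TABLE):
--         for i, gap in enumerate(gaps):
--             if key in gap:
--                 plan[i] = action
--     return plan
-- ===== Notes on version B (the rewrite author's own statement) =====
-- stated objective: alternative
-- what changed: Replaces A's per-gap if/elif first-match chain by staged whole-list passes: the plan starts as all fallbacks and each keyword (iterated in reverse priority order) overwrites the slots of gaps containing it, so the highest-priority keyword wins by overwriting last.
import Mathlib
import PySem

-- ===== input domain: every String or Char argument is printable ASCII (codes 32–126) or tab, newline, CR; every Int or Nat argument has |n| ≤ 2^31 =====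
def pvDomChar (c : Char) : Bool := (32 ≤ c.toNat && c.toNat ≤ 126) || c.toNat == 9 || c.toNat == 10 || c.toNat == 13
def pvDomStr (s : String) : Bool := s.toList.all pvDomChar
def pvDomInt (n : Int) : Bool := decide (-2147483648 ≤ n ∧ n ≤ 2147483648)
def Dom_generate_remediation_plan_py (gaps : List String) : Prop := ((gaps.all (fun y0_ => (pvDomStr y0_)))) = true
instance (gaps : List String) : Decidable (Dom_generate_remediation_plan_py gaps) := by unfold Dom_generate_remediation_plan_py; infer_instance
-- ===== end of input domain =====

-- B replaces A's per-gap if/elif first-match loop by staged overwrite passes over the whole plan,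
-- one pass per keyword in reverse priority order (alternative decomposition; same cost).

-- ===== PORT A =====
def generate_remediation_plan_py (gaps : List String) : List String :=
  if gaps = [] then []
  else
    gaps.foldl (fun acc gap =>
      if PySem.Str.isIn "financial_reporting" gap then
        acc ++ ["Implement additional financial controls and review processes"]
      else if PySem.Str.isIn "data_protection" gap then
        acc ++ ["Enhance data protection policies and staff training"]
      else if PySem.Str.isIn "disclosure" gap then
        acc ++ ["Review and update disclosure procedures"]
      else
        acc ++ ["Address compliance gap: " ++ gap]) []

-- ===== PORT B =====
def pvTable : List (String × String) :=
  [("financial_reporting", "Implement additional financial controls and review processes"),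
   ("data_protection", "Enhance data protection policies and staff training"),
   ("disclosure", "Review and update disclosure procedures")]

-- one overwrite pass: plan[i] := action wherever key in gaps[i]  (the i-indexed mutation, as zip+map)
def pvOverwritePass (key action : String) (gaps plan : List String) : List String :=
  (gaps.zip plan).map (fun gp => if PySem.Str.isIn key gp.1 then action else gp.2)

def generate_remediation_plan_py_alt (gaps : List String) : List String :=
  (pvTable.reverse).foldl
    (fun plan ka => pvOverwritePass ka.1 ka.2 gaps plan)
    (gaps.map (fun gap => "Address compliance gap: " ++ gap))

-- ===== PRECONDITION & SPEC =====
def Spec_generate_remediation_plan_py (gaps : List String) (out : List String) : Prop := out = generate_remediation_plan_py_alt gaps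
instance (gaps : List String) (out : List String) : Decidable (Spec_generate_remediation_plan_py gaps out) := by unfold Spec_generate_remediation_plan_py; infer_instance

-- ===== CLAIM (what is proved, stated in full; the proofs are below) =====
def Claim_equal_generate_remediation_plan_py : Prop := ∀ (gaps : List String), Dom_generate_remediation_plan_py gaps → Spec_generate_remediation_plan_py gaps (generate_remediation_plan_py gaps)

-- ===== LEMMAS AND PROOFS =====

-- an overwrite pass applied to a pointwise-built plan is again a pointwise map over gaps
theorem pvOverwritePass_map (key action : String) (f : String → String) (gaps : List String) :
    pvOverwritePass key action gaps (gaps.map f)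
      = gaps.map (fun g => if PySem.Str.isIn key g then action else f g) := by
  induction gaps with
  | nil => rfl
  | cons g gs ih => simp [pvOverwritePass, List.zip] at ih ⊢; exact ih

-- ===== VERDICT (by name: the statement is the Claim_ definition above) =====
theorem generate_remediation_plan_py_spec : Claim_equal_generate_remediation_plan_py := by
  intro gaps _
  unfold Spec_generate_remediation_plan_py generate_remediation_plan_py generate_remediation_plan_py_alt
  have hB : (pvTable.reverse).foldl
      (fun plan ka => pvOverwritePass ka.1 ka.2 gaps plan)
      (gaps.map (fun gap => "Address compliance gap: " ++ gap))
      = gaps.map (fun gap =>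
          if PySem.Str.isIn "financial_reporting" gap then
            "Implement additional financial controls and review processes"
          else if PySem.Str.isIn "data_protection" gap then
            "Enhance data protection policies and staff training"
          else if PySem.Str.isIn "disclosure" gap then
            "Review and update disclosure procedures"
          else
            "Address compliance gap: " ++ gap) := by
    simp only [pvTable, List.reverse, List.foldl, List.reverseAux]
    rw [pvOverwritePass_map, pvOverwritePass_map, pvOverwritePass_map]
  rw [hB]
  split
  · next h => subst h; rfl
  · rw [show (fun acc gap =>
        if PySem.Str.isIn "financial_reporting" gap then
          acc ++ ["Implement additional financial controls and review processes"]
        else if PySem.Str.isIn "data_protection" gap then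
          acc ++ ["Enhance data protection policies and staff training"]
        else if PySem.Str.isIn "disclosure" gap then
          acc ++ ["Review and update disclosure procedures"]
        else
          acc ++ ["Address compliance gap: " ++ gap])
      = (fun (acc : List String) gap => acc ++
          [if PySem.Str.isIn "financial_reporting" gap then
            "Implement additional financial controls and review processes"
          else if PySem.Str.isIn "data_protection" gap then
            "Enhance data protection policies and staff training"
          else if PySem.Str.isIn "disclosure" gap then
            "Review and update disclosure procedures"
          else
            "Address compliance gap: " ++ gap]) from by
        funext acc gap; split_ifs <;> rfl]
    exact (PySem.List.foldl_append_singleton_eq_map _ _ _).trans (List.nil_append _)
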